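-- pv_equiv track=rewrite | github.com/mutalyzer/mutalyzer | normalizer/protein.py | new_index
-- ===== SOURCE A (Python) =====
-- def new_index(value, slices):
--     output = 0
--     for s in slices:
--         if s[0] <= value <= s[1]:
--             output += value - s[0]
--             break
--         else:
--             output += s[1] - s[0]
--     return output
-- ===== SOURCE B (Python) =====
-- def new_index(value, slices):
--     i = next((i for i, s in enumerate(slices) if s[0] <= value <= s[1]), None)
--     if i is None:
--         return sum(s[1] - s[0] for s in slices)
--     return sum(s[1] - s[0] for s in slices[:i]) + (value - slices[i][0])
-- ===== Notes on version B (the rewrite author's own statement) =====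
-- stated objective: alternative
-- what changed: Splits A's fused accumulate-while-scanning loop into a locating pass (first slice containing value) plus separate prefix/total aggregation sums.
import Mathlib
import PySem

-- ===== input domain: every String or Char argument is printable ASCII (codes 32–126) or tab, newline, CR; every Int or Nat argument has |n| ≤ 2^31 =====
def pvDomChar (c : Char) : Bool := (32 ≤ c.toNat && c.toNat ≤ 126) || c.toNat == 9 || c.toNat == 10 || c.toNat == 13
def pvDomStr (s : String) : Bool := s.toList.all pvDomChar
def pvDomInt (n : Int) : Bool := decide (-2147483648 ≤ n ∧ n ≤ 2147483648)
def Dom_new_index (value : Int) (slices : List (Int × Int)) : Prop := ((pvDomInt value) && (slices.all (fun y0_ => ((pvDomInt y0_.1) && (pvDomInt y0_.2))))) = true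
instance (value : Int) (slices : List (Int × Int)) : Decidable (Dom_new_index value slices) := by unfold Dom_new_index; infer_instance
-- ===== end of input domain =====

-- B replaces A's fused accumulate-and-break loop by a locate-then-aggregate decomposition (objective: alternative; same O(n)).

-- ===== PORT A =====
-- A's for-loop with accumulator `output` and break
def newIndexLoop (value : Int) (acc : Int) : List (Int × Int) → Int
  | [] => acc
  | s :: rest =>
    if s.1 ≤ value ∧ value ≤ s.2 then acc + (value - s.1)
    else newIndexLoop value (acc + (s.2 - s.1)) rest

def new_index (value : Int) (slices : List (Int × Int)) : Int :=
  newIndexLoop value 0 slices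

-- ===== PORT B =====
def new_index_alt (value : Int) (slices : List (Int × Int)) : Int :=
  match slices.findIdx? (fun s => decide (s.1 ≤ value ∧ value ≤ s.2)) with
  | none => ((slices.map (fun s => s.2 - s.1)).sum)
  | some i => (((slices.take i).map (fun s => s.2 - s.1)).sum) + (value - ((slices.drop i).headD (0, 0)).1)

-- ===== PRECONDITION & SPEC =====
def Spec_new_index (value : Int) (slices : List (Int × Int)) (out : Int) : Prop := out = new_index_alt value slices
instance (value : Int) (slices : List (Int × Int)) (out : Int) : Decidable (Spec_new_index value slices out) := by unfold Spec_new_index; infer_instance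

-- ===== CLAIM (what is proved, stated in full; the proofs are below) =====
def Claim_equal_new_index : Prop := ∀ (value : Int) (slices : List (Int × Int)), Dom_new_index value slices → Spec_new_index value slices (new_index value slices)

-- ===== LEMMAS AND PROOFS =====

lemma newIndexLoop_eq_alt (value : Int) :
    ∀ (slices : List (Int × Int)) (acc : Int),
      newIndexLoop value acc slices = acc + new_index_alt value slices := by
  intro slices
  induction slices with
  | nil => intro acc; simp [newIndexLoop, new_index_alt]
  | cons s rest ih =>
    intro acc
    by_cases h : s.1 ≤ value ∧ value ≤ s.2
    · simp [newIndexLoop, new_index_alt, List.findIdx?_cons, h]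
    · have hrec := ih (acc + (s.2 - s.1))
      simp only [newIndexLoop, if_neg h, hrec]
      have : new_index_alt value (s :: rest) = (s.2 - s.1) + new_index_alt value rest := by
        simp only [new_index_alt, List.findIdx?_cons, h, decide_eq_true_eq, if_neg h]
        cases hfind : rest.findIdx? (fun t => decide (t.1 ≤ value ∧ value ≤ t.2)) with
        | none => simp [List.map_cons]
        | some j => simp [List.take_succ_cons, List.drop_succ_cons]; ring
      rw [this]; ring

-- ===== VERDICT (by name: the statement is the Claim_ definition above) =====
theorem new_index_spec : Claim_equal_new_index := by
  intro value slices _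
  unfold Spec_new_index new_index
  simpa using newIndexLoop_eq_alt value slices 0
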